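-- pv_equiv track=rewrite | github.com/peiel/LogseqExportMarkdown | markdown_parser.py | get_tags_by_line
-- ===== SOURCE A (Python) =====
-- def find_tags_line(lines):
--     for line in lines:
--         if 'tags::' in line:
--             return line
--     return []
--
-- def get_tags_by_line(lines):
--     """
--     获取 Markdown 的标签
--     :param lines:
--     :return: 标签列表
--     """
--     tags_prop_line = find_tags_line(lines)
--     tags = list()
--     tag = ''
--     for ch in tags_prop_line:
--         if '#' == ch:
--             tag = ch
--             continue
--         if '#' in tag and ch != ' ':
--             tag = tag + ch
--             continue
--         if ch == ' ' and tag != '':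
--             tags.append(tag.replace('[', '').strip())
--             tag = ''
--     if tag != '':
--         tags.append(tag.replace('[', '').strip())
--     return tags
-- ===== SOURCE B (Python) =====
-- def find_tags_line(lines):
--     for line in lines:
--         if 'tags::' in line:
--             return line
--     return []
--
-- def get_tags_by_line(lines):
--     line = find_tags_line(lines)
--     if not line:
--         return []
--     tags = []
--     for token in line.split(' '):
--         idx = token.rfind('#')
--         if idx != -1:
--             tags.append(token[idx:].replace('[', '').strip())
--     return tags
-- ===== Notes on version B (the rewrite author's own statement) =====
-- stated objective: idiomatic
-- what changed: Replaces A's character-by-character accumulator state machine with split-on-space tokenization plus a per-token rfind('#') last-hash suffix lookup.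
import Mathlib
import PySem

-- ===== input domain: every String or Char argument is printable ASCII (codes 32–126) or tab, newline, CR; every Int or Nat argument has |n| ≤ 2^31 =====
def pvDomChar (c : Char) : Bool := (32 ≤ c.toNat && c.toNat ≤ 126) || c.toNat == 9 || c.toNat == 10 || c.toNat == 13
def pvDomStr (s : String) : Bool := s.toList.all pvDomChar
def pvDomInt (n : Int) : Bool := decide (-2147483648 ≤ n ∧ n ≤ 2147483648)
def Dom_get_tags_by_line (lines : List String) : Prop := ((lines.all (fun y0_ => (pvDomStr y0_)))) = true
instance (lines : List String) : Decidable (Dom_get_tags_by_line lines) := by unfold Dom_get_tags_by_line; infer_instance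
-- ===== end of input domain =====

-- B replaces A's character-by-character accumulator state machine with split-on-space
-- tokenization plus a per-token rfind('#') suffix lookup (objective: idiomatic).

-- shared helper: find_tags_line is textually the same function in A and in B.
-- It returns the first line containing 'tags::' (as its characters), else [];
-- (Python returns the str or the empty list; both are only iterated over / emptiness-tested, so List Char is exact)
def pvFindTagsLine : List String → List Char
  | [] => []
  | line :: rest =>
    if PySem.Str.isIn "tags::" line then line.toList else pvFindTagsLine rest

-- ===== PORT A =====
-- one iteration of A's for-loop over the characters; state = (tags, tag)
def pvStepA (st : List String × List Char) (ch : Char) : List String × List Char :=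
  if ch = '#' then (st.1, [ch])
  else if PySem.Chars.isIn ['#'] st.2 = true ∧ ch ≠ ' ' then (st.1, st.2 ++ [ch])
  else if ch = ' ' ∧ st.2 ≠ [] then
    (st.1 ++ [String.ofList (PySem.Chars.strip (PySem.Chars.replace st.2 ['['] []))], [])
  else st

def get_tags_by_line (lines : List String) : List String :=
  let tags_prop_line := pvFindTagsLine lines
  let st := tags_prop_line.foldl pvStepA ([], ([] : List Char))
  if st.2 ≠ [] then st.1 ++ [String.ofList (PySem.Chars.strip (PySem.Chars.replace st.2 ['['] []))]
  else st.1

-- ===== PORT B =====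
def get_tags_by_line_alt (lines : List String) : List String :=
  let line := pvFindTagsLine lines
  if line = [] then []
  else
    (PySem.Chars.splitOn line [' ']).foldl (fun tags token =>
      let idx := PySem.Chars.rfind token ['#']
      if idx ≠ -1 then
        tags ++ [String.ofList (PySem.Chars.strip (PySem.Chars.replace
          (PySem.Chars.slice token (some idx) none) ['['] []))]
      else tags) []

-- ===== PRECONDITION & SPEC =====
def Spec_get_tags_by_line (lines : List String) (out : List String) : Prop := out = get_tags_by_line_alt lines
instance (lines : List String) (out : List String) : Decidable (Spec_get_tags_by_line lines out) := by unfold Spec_get_tags_by_line; infer_instance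

-- ===== CLAIM (what is proved, stated in full; the proofs are below) =====
def Claim_equal_get_tags_by_line : Prop := ∀ (lines : List String), Dom_get_tags_by_line lines → Spec_get_tags_by_line lines (get_tags_by_line lines)

-- ===== LEMMAS AND PROOFS =====

-- proof-side helpers
def pvClean (t : List Char) : String :=
  String.ofList (PySem.Chars.strip (PySem.Chars.replace t ['['] []))

def pvFlush (t : List Char) : List String := if t = [] then [] else [pvClean t]

-- A's tag update restricted to a non-space character, with '#' ∈ tag replaced by tag ≠ []
def pvStep' (t : List Char) (c : Char) : List Char :=
  if c = '#' then ['#'] else if t ≠ [] then t ++ [c] else t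

-- the common semantics both programs compute, by recursion on the characters
def pvBfold : List Char → List Char → List String
  | tag, [] => pvFlush tag
  | tag, c :: t => if c = ' ' then pvFlush tag ++ pvBfold [] t else pvBfold (pvStep' tag c) t

-- structural split on a single space, with the pending token prefix
def pvMsplit : List Char → List Char → List (List Char)
  | pre, [] => [pre]
  | pre, c :: t => if c = ' ' then pre :: pvMsplit [] t else pvMsplit (pre ++ [c]) t

-- B's loop body as a named function (definitionally the port's lambda)
def pvBstep (tags : List String) (token : List Char) : List String :=
  let idx := PySem.Chars.rfind token ['#']
  if idx ≠ -1 then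
    tags ++ [String.ofList (PySem.Chars.strip (PySem.Chars.replace
      (PySem.Chars.slice token (some idx) none) ['['] []))]
  else tags

-- splitOn with a single-space separator is pvMsplit
theorem pvSplitOn_go_spec : ∀ (fuel : Nat) (l cur : List Char) (acc : List (List Char)),
    l.length ≤ fuel →
    PySem.Chars.splitOn.go [' '] fuel l cur acc = acc.reverse ++ pvMsplit cur.reverse l := by
  intro fuel
  induction fuel with
  | zero =>
    intro l cur acc hl
    have : l = [] := List.length_eq_zero_iff.mp (Nat.le_zero.mp hl)
    subst this
    rw [PySem.Chars.splitOn.go]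
    simp [pvMsplit]
  | succ f ih =>
    intro l cur acc hl
    cases l with
    | nil =>
      rw [PySem.Chars.splitOn.go]; simp [pvMsplit]; omega
    | cons c rest =>
      rw [PySem.Chars.splitOn.go]
      by_cases hc : c = ' '
      · subst hc
        simp only [List.isPrefixOf, BEq.rfl, Bool.true_and, if_pos]
        rw [ih _ _ _ (by simpa using Nat.le_of_succ_le_succ hl)]
        simp [pvMsplit]
      · have : [' '].isPrefixOf (c :: rest) = false := by
          simp [List.isPrefixOf]; exact fun h => (hc h.symm).elim
        rw [this]
        simp only [Bool.false_eq_true, if_false]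
        rw [ih _ _ _ (by simpa using Nat.le_of_succ_le_succ hl)]
        simp [pvMsplit, hc]

theorem pvSplitOn_eq (cs : List Char) : PySem.Chars.splitOn cs [' '] = pvMsplit [] cs := by
  have := pvSplitOn_go_spec (cs.length + 1) cs [] [] (by omega)
  simpa [PySem.Chars.splitOn] using this

-- rfind on a singleton needle: fuel irrelevance below the length
theorem pvPrefixOf_append (l : List Char) (c : Char) (h : l ≠ []) :
    ['#'].isPrefixOf (l ++ [c]) = ['#'].isPrefixOf l := by
  cases l with
  | nil => exact (h rfl).elim
  | cons a t => simp [List.isPrefixOf]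

theorem pvRfind_go_append (s : List Char) (c : Char) :
    ∀ j, j < s.length → PySem.Chars.rfind.go (s ++ [c]) ['#'] j = PySem.Chars.rfind.go s ['#'] j := by
  intro j
  induction j with
  | zero =>
    intro hj
    rw [PySem.Chars.rfind.go, PySem.Chars.rfind.go]
    rw [pvPrefixOf_append s c (by intro h; simp [h] at hj)]
  | succ j ihj =>
    intro hj
    rw [PySem.Chars.rfind.go, PySem.Chars.rfind.go]
    rw [List.drop_append_of_le_length (by omega)]
    rw [pvPrefixOf_append _ c (by
      intro h
      have := List.drop_eq_nil_iff.mp h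
      omega)]
    split
    · rfl
    · exact ihj (by omega)

theorem pvRfind_snoc (s : List Char) (c : Char) :
    PySem.Chars.rfind (s ++ [c]) ['#'] = if c = '#' then (s.length : Int) else PySem.Chars.rfind s ['#'] := by
  unfold PySem.Chars.rfind
  have hlen : (s ++ [c]).length = s.length + 1 := by simp
  rw [hlen]
  rw [PySem.Chars.rfind.go]
  have hdrop1 : (s ++ [c]).drop (s.length + 1) = [] := by
    apply List.drop_eq_nil_iff.mpr; simp
  rw [hdrop1]
  simp only [List.isPrefixOf, Bool.false_eq_true, if_false]
  cases s with
  | nil =>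
    simp only [List.nil_append, List.length_nil]
    rw [PySem.Chars.rfind.go, PySem.Chars.rfind.go]
    by_cases hc : c = '#' <;> simp [List.isPrefixOf, hc]
    exact fun h => hc h.symm
  | cons a t =>
    have hl : (a :: t).length = t.length + 1 := by simp
    rw [hl]
    rw [PySem.Chars.rfind.go]
    have hdrop2 : ((a :: t) ++ [c]).drop (t.length + 1) = [c] := by
      rw [List.drop_append_of_le_length (by simp)]
      simp
    rw [hdrop2]
    by_cases hc : c = '#'
    · simp [List.isPrefixOf, hc]
    · have : ['#'].isPrefixOf [c] = false := by simp [List.isPrefixOf]; exact fun h => (hc h.symm).elim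
      rw [this]
      simp only [Bool.false_eq_true, if_false, if_neg hc]
      rw [pvRfind_go_append (a :: t) c t.length (by simp)]
      rw [PySem.Chars.rfind.go]
      have hdrop3 : (a :: t).drop (t.length + 1) = [] := by
        apply List.drop_eq_nil_iff.mpr; simp
      rw [hdrop3]
      simp [List.isPrefixOf]

theorem pvRfind_go_spec (s : List Char) : ∀ j,
    PySem.Chars.rfind.go s ['#'] j = -1 ∨
      ∃ i : Nat, i ≤ j ∧ PySem.Chars.rfind.go s ['#'] j = (i : Int) ∧ ['#'].isPrefixOf (s.drop i) := by
  intro j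
  induction j with
  | zero =>
    rw [PySem.Chars.rfind.go]
    by_cases h : ['#'].isPrefixOf s
    · exact Or.inr ⟨0, le_refl _, by simp [h], by simpa using h⟩
    · simp [h]
  | succ j ihj =>
    rw [PySem.Chars.rfind.go]
    by_cases h : ['#'].isPrefixOf (s.drop (j + 1))
    · exact Or.inr ⟨j + 1, le_refl _, by simp [h], h⟩
    · simp only [h, Bool.false_eq_true, if_false]
      rcases ihj with h1 | ⟨i, hi, he, hp⟩
      · exact Or.inl h1
      · exact Or.inr ⟨i, by omega, he, hp⟩

theorem pvRfind_spec (s : List Char) (i : Nat) (h : PySem.Chars.rfind s ['#'] = (i : Int)) :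
    ['#'].isPrefixOf (s.drop i) := by
  rcases pvRfind_go_spec s s.length with h1 | ⟨i', _, he, hp⟩
  · rw [PySem.Chars.rfind] at h
    omega
  · rw [PySem.Chars.rfind] at h
    rw [h] at he
    have : i = i' := by exact_mod_cast he
    subst this
    exact hp

-- per-token: A's tag machine over a token equals B's rfind suffix
theorem pvK1 : ∀ (tok : List Char), PySem.Chars.rfind tok ['#'] = -1 →
    ∀ tag, tok.foldl pvStep' tag = if tag = [] then [] else tag ++ tok := by
  intro tok
  induction tok using List.reverseRecOn with
  | nil => intro _ tag; by_cases htag : tag = [] <;> simp [htag]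
  | append_singleton tok c ih =>
    intro h tag
    have hsnoc := pvRfind_snoc tok c
    by_cases hc : c = '#'
    · rw [if_pos hc, h] at hsnoc
      omega
    · rw [if_neg hc, h] at hsnoc
      rw [List.foldl_append, ih hsnoc.symm tag]
      by_cases htag : tag = [] <;>
        simp [htag, pvStep', hc]

theorem pvK2 (tok : List Char) (i : Nat) (h : PySem.Chars.rfind tok ['#'] = (i : Int)) :
    ∀ tag, tok.foldl pvStep' tag = tok.drop i := by
  revert i h
  induction tok using List.reverseRecOn with
  | nil =>
    intro i h
    have : PySem.Chars.rfind [] ['#'] = -1 := by decide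
    rw [this] at h
    omega
  | append_singleton tok c ih =>
    intro i h tag
    have hsnoc := pvRfind_snoc tok c
    rw [h] at hsnoc
    by_cases hc : c = '#'
    · rw [if_pos hc] at hsnoc
      have hi : i = tok.length := by exact_mod_cast hsnoc
      subst hi hc
      rw [List.foldl_append]
      simp [pvStep']
    · rw [if_neg hc] at hsnoc
      have hpre := pvRfind_spec tok i hsnoc.symm
      have hne : tok.drop i ≠ [] := by
        intro hnil; rw [hnil] at hpre; simp [List.isPrefixOf] at hpre
      have hle : i ≤ tok.length := by
        by_contra hgt
        exact hne (List.drop_eq_nil_iff.mpr (by omega))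
      rw [List.foldl_append, ih i hsnoc.symm tag]
      simp only [List.foldl_cons, List.foldl_nil, pvStep', if_neg hc]
      rw [List.drop_append_of_le_length hle]
      simp [hne]

theorem pvBstep_eq (acc : List String) (tok : List Char) :
    pvBstep acc tok = acc ++ pvFlush (tok.foldl pvStep' []) := by
  by_cases h : PySem.Chars.rfind tok ['#'] = -1
  · rw [pvK1 tok h []]
    simp [pvBstep, h, pvFlush]
  · rcases pvRfind_go_spec tok tok.length with h1 | ⟨i, _, he, _⟩
    · exact (h h1).elim
    · have hr : PySem.Chars.rfind tok ['#'] = (i : Int) := he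
      have hpre := pvRfind_spec tok i hr
      have hne : tok.drop i ≠ [] := by
        intro hnil; rw [hnil] at hpre; simp [List.isPrefixOf] at hpre
      have hs : PySem.Chars.slice tok (some (i : Int)) none = tok.drop i := by
        simp [pysem]
      rw [pvK2 tok i hr []]
      simp [pvBstep, hr, pvFlush, hne, pvClean]

theorem pvN : ∀ (cs pre : List Char) (acc : List String),
    (pvMsplit pre cs).foldl pvBstep acc = acc ++ pvBfold (pre.foldl pvStep' []) cs := by
  intro cs
  induction cs with
  | nil =>
    intro pre acc
    simp [pvMsplit, pvBfold, pvBstep_eq]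
  | cons c t ih =>
    intro pre acc
    by_cases hc : c = ' '
    · subst hc
      have hms : pvMsplit pre (' ' :: t) = pre :: pvMsplit [] t := by simp [pvMsplit]
      rw [hms, List.foldl_cons, ih [] (pvBstep acc pre), pvBstep_eq]
      simp [pvBfold, List.append_assoc]
    · have hms : pvMsplit pre (c :: t) = pvMsplit (pre ++ [c]) t := by simp [pvMsplit, hc]
      rw [hms, ih (pre ++ [c]) acc]
      simp only [pvBfold, if_neg hc]
      simp [List.foldl_append]

theorem pvM : ∀ (cs : List Char) (tags : List String) (tag : List Char),
    (tag = [] ∨ '#' ∈ tag) →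
    (let st := cs.foldl pvStepA (tags, tag);
     if st.2 ≠ [] then st.1 ++ [pvClean st.2] else st.1) = tags ++ pvBfold tag cs := by
  intro cs
  induction cs with
  | nil =>
    intro tags tag _
    by_cases htag : tag = [] <;> simp [pvBfold, pvFlush, htag]
  | cons c t ih =>
    intro tags tag hinv
    simp only [List.foldl_cons]
    by_cases hc : c = '#'
    · subst hc
      have hst : pvStepA (tags, tag) '#' = (tags, ['#']) := by simp [pvStepA]
      rw [hst, ih tags ['#'] (Or.inr (by simp))]
      simp [pvBfold, pvStep']
    · by_cases hmem : '#' ∈ tag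
      · have htagne : tag ≠ [] := by intro hnil; rw [hnil] at hmem; simp at hmem
        have hisin : PySem.Chars.isIn ['#'] tag = true := by
          rw [PySem.Chars.isIn_iff_infix]
          exact (List.singleton_infix_iff '#' tag).mpr hmem
        by_cases hsp : c = ' '
        · subst hsp
          have hst : pvStepA (tags, tag) ' ' = (tags ++ [pvClean tag], []) := by
            simp [pvStepA, htagne, pvClean]
          rw [hst, ih (tags ++ [pvClean tag]) [] (Or.inl rfl)]
          simp [pvBfold, pvFlush, htagne, List.append_assoc]
        · have hst : pvStepA (tags, tag) c = (tags, tag ++ [c]) := by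
            simp [pvStepA, hc, hisin, hsp]
          rw [hst, ih tags (tag ++ [c]) (Or.inr (by simp [hmem]))]
          simp [pvBfold, pvStep', hc, hsp, htagne]
      · have htag : tag = [] := by
          rcases hinv with h | h
          · exact h
          · exact (hmem h).elim
        subst htag
        have hfalse : PySem.Chars.isIn ['#'] ([] : List Char) = false := by decide
        have hst : pvStepA (tags, []) c = (tags, []) := by
          simp [pvStepA, hc, hfalse]
        rw [hst, ih tags [] (Or.inl rfl)]
        by_cases hsp : c = ' ' <;> simp [pvBfold, pvStep', pvFlush, hc, hsp]

-- ===== VERDICT (by name: the statement is the Claim_ definition above) =====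
theorem get_tags_by_line_spec : Claim_equal_get_tags_by_line := by
  intro lines _
  unfold Spec_get_tags_by_line
  show get_tags_by_line lines = get_tags_by_line_alt lines
  unfold get_tags_by_line get_tags_by_line_alt
  have hA := pvM (pvFindTagsLine lines) [] [] (Or.inl rfl)
  simp only [pvClean] at hA
  by_cases hcs : pvFindTagsLine lines = []
  · rw [hcs]
    simp
  · rw [if_neg hcs, pvSplitOn_eq]
    have hB := pvN (pvFindTagsLine lines) [] []
    show _ = (pvMsplit [] (pvFindTagsLine lines)).foldl pvBstep []
    rw [hB]
    simpa using hA
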